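-- pv_equiv track=rewrite | github.com/dfntlntDeb/pythonprojzxc | practice_rng.py | categorize_traits
-- ===== SOURCE A (Python) =====
-- traits = {
--     "Brawler 1": 0.0795,
--     "Brawler 2": 0.079,
--     "Brawler 3": 0.078,
--     "Swiftness 1": 0.07,
--     "Swiftness 2": 0.07,
--     "Swiftness 3": 0.07,
--     "Hunter 1": 0.07,
--     "Hunter 2": 0.07,
--     "Hunter 3": 0.07,
--     "Critical 1": 0.0615,
--     "Critical 2": 0.061,
--     "Critical 3": 0.06,
--     "Prodigy 1": 0.1,
--     "Bullseye 1": 0.025,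
--     "Midas Touch 1": 0.015,
--     "Sonic 1": 0.01,
--     "Precision 1": 0.008,
--     "Requiem 1": 0.002,
--     "Almighty 1": 0.001
-- }
--
-- rarity = {
--     "Normal": ["Brawler 1", "Brawler 2", "Brawler 3", "Swiftness 1", "Swiftness 2", "Swiftness 3", "Hunter 1", "Hunter 2", "Hunter 3", "Critical 1", "Critical 2", "Critical 3", "Prodigy 1"],
--     "Rare": ["Bullseye 1"],
--     "Epic": ["Midas Touch 1"],
--     "Legendary": ["Sonic 1", "Precision 1"],
--     "Mythical": ["Requiem 1", "Almighty 1"]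
-- }
--
-- def categorize_traits(rolled_traits):
--     counts = {trait: 0 for trait in traits.keys()}
--     rarity_counts = {category: 0 for category in rarity.keys()}
--     for trait in rolled_traits:
--         counts[trait] += 1
--         for category, trait_list in rarity.items():
--             if trait in trait_list:
--                 rarity_counts[category] += 1
--                 break
--     return counts, rarity_counts
-- ===== SOURCE B (Python) =====
-- traits = {
--     "Brawler 1": 0.0795,
--     "Brawler 2": 0.079,
--     "Brawler 3": 0.078,
--     "Swiftness 1": 0.07,
--     "Swiftness 2": 0.07,
--     "Swiftness 3": 0.07,
--     "Hunter 1": 0.07,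
--     "Hunter 2": 0.07,
--     "Hunter 3": 0.07,
--     "Critical 1": 0.0615,
--     "Critical 2": 0.061,
--     "Critical 3": 0.06,
--     "Prodigy 1": 0.1,
--     "Bullseye 1": 0.025,
--     "Midas Touch 1": 0.015,
--     "Sonic 1": 0.01,
--     "Precision 1": 0.008,
--     "Requiem 1": 0.002,
--     "Almighty 1": 0.001
-- }
--
-- rarity = {
--     "Normal": ["Brawler 1", "Brawler 2", "Brawler 3", "Swiftness 1", "Swiftness 2", "Swiftness 3", "Hunter 1", "Hunter 2", "Hunter 3", "Critical 1", "Critical 2", "Critical 3", "Prodigy 1"],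
--     "Rare": ["Bullseye 1"],
--     "Epic": ["Midas Touch 1"],
--     "Legendary": ["Sonic 1", "Precision 1"],
--     "Mythical": ["Requiem 1", "Almighty 1"]
-- }
--
-- def categorize_traits(rolled_traits):
--     # tally-then-merge: one sparse tally of the rolled list, then the tally's few
--     # distinct entries are merged into the initialized counts dict, and each
--     # rarity bucket is the sum of the tally over its (static) trait list --
--     # no per-element updates of the result dicts, no nested category scan.
--     tally = {}
--     for trait in rolled_traits:
--         tally[trait] = tally.get(trait, 0) + 1
--     counts = {trait: 0 for trait in traits}
--     for trait, c in tally.items():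
--         counts[trait] += c
--     rarity_counts = {category: sum(tally.get(t, 0) for t in trait_list)
--                      for category, trait_list in rarity.items()}
--     return counts, rarity_counts
-- ===== Notes on version B (the rewrite author's own statement) =====
-- stated objective: alternative
-- what changed: A initializes both result dicts and updates them per rolled element with a nested scan-with-break over the category lists; B instead makes one sparse tally pass over rolled_traits, merges the tally's few distinct entries into the initialized counts dict, and fills each rarity bucket by summing the tally over that category's static list — no per-element updates of the result dicts and no nested category scan.
import Mathlib
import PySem

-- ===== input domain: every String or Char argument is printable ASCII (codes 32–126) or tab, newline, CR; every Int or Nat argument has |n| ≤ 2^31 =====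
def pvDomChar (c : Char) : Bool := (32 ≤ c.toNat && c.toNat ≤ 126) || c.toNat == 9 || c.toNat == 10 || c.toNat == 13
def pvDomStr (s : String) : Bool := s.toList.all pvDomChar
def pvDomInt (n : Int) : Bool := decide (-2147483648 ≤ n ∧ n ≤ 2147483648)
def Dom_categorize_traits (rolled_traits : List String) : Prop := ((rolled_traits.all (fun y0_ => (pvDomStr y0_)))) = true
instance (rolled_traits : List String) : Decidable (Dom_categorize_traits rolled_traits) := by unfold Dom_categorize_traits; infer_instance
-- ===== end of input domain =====

-- B replaces A's per-element updates (with nested scan-with-break over the category lists)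
-- by a tally-then-merge scheme: one sparse tally of the rolled list, merged into the
-- initialized counts dict and summed per rarity bucket; same return value on Pre_.


-- ===== PORT A =====
def traitNames : List String :=
  ["Brawler 1", "Brawler 2", "Brawler 3", "Swiftness 1", "Swiftness 2", "Swiftness 3", "Hunter 1", "Hunter 2", "Hunter 3", "Critical 1", "Critical 2", "Critical 3", "Prodigy 1", "Bullseye 1", "Midas Touch 1", "Sonic 1", "Precision 1", "Requiem 1", "Almighty 1"]

def rarityItems : List (String × List String) :=
  [("Normal", ["Brawler 1", "Brawler 2", "Brawler 3", "Swiftness 1", "Swiftness 2", "Swiftness 3", "Hunter 1", "Hunter 2", "Hunter 3", "Critical 1", "Critical 2", "Critical 3", "Prodigy 1"]),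
   ("Rare", ["Bullseye 1"]),
   ("Epic", ["Midas Touch 1"]),
   ("Legendary", ["Sonic 1", "Precision 1"]),
   ("Mythical", ["Requiem 1", "Almighty 1"])]

-- inner 'for category, trait_list in rarity.items(): if trait in trait_list: …; break'
def aRarityScan : List (String × List String) → PySem.Dict String Int → String → PySem.Dict String Int
  | [], rc, _ => rc
  | (category, trait_list) :: rest, rc, trait =>
      if trait_list.contains trait then rc.modify category 0 (· + 1)
      else aRarityScan rest rc trait

def categorize_traits (rolled_traits : List String) : (List (String × Int)) × (List (String × Int)) :=
  let counts : PySem.Dict String Int := traitNames.foldl (fun d t => d.insert t 0) PySem.Dict.empty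
  let rarity_counts : PySem.Dict String Int := rarityItems.foldl (fun d p => d.insert p.1 0) PySem.Dict.empty
  let st := rolled_traits.foldl
    (fun (st : PySem.Dict String Int × PySem.Dict String Int) trait =>
      (st.1.modify trait 0 (· + 1), aRarityScan rarityItems st.2 trait))
    (counts, rarity_counts)
  (st.1.items, st.2.items)

-- ===== PORT B =====
-- tally-then-merge: a 'tally[t] = tally.get(t, 0) + 1' pass, the tally merged into the
-- initialized counts dict, and each rarity bucket summed from the tally over its list.
-- 'counts[trait] += c' is ported as modify: exact whenever the key is present (Pre_;
-- outside Pre_ the Python raises KeyError there).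
def categorize_traits_alt (rolled_traits : List String) : (List (String × Int)) × (List (String × Int)) :=
  let tally : PySem.Dict String Int :=
    rolled_traits.foldl (fun d t => d.insert t (d.getD t 0 + 1)) PySem.Dict.empty
  let counts0 : PySem.Dict String Int :=
    traitNames.foldl (fun d t => d.insert t 0) PySem.Dict.empty
  let counts : PySem.Dict String Int :=
    tally.items.foldl (fun d p => d.modify p.1 0 (· + p.2)) counts0
  let rarity_counts : PySem.Dict String Int :=
    rarityItems.foldl (fun d p => d.insert p.1 (p.2.foldl (fun s t => s + tally.getD t 0) 0)) PySem.Dict.empty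
  (counts.items, rarity_counts.items)

-- ===== PRECONDITION & SPEC =====
-- Pre_ excludes exactly the inputs on which the Python A raises KeyError: a rolled trait not among the 19 known trait names.
def Pre_categorize_traits (rolled_traits : List String) : Prop :=
  rolled_traits.all (fun t => traitNames.contains t) = true
instance (rolled_traits : List String) : Decidable (Pre_categorize_traits rolled_traits) := by unfold Pre_categorize_traits; infer_instance

def pvWitness_categorize_traits : List String := ["Sonic 1", "Brawler 2", "Sonic 1", "Almighty 1"]

def Spec_categorize_traits (rolled_traits : List String) (out : (List (String × Int)) × (List (String × Int))) : Prop := out = categorize_traits_alt rolled_traits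
instance (rolled_traits : List String) (out : (List (String × Int)) × (List (String × Int))) : Decidable (Spec_categorize_traits rolled_traits out) := by unfold Spec_categorize_traits; infer_instance

-- ===== CLAIM (what is proved, stated in full; the proofs are below) =====
def Claim_equal_categorize_traits : Prop := ∀ (rolled_traits : List String), Dom_categorize_traits rolled_traits → Pre_categorize_traits rolled_traits → Spec_categorize_traits rolled_traits (categorize_traits rolled_traits)

-- ===== LEMMAS AND PROOFS =====

-- category names, and the reverse lookup trait → category (proof-side only)
def catNames : List String := rarityItems.map (·.1)

def catF (t : String) : String :=
  (rarityItems.foldl (fun d p => p.2.foldl (fun d u => d.insert u p.1) d) PySem.Dict.empty).getD t ""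

-- a Set.update that adds nothing new is the identity
theorem set_update_of_subset {α : Type} [BEq α] [LawfulBEq α] (s : PySem.Set α) (xs : List α)
    (h : ∀ x ∈ xs, x ∈ s) : PySem.Set.update s xs = s := by
  rw [PySem.Set.update_eq_append_filter]
  have hnil : (PySem.Set.ofList xs).filter (fun y => !(PySem.Set.contains s y)) = [] := by
    rw [List.filter_eq_nil_iff]
    intro y hy
    have hys : y ∈ s := h y ((PySem.Set.mem_ofList (xs := xs) (y := y)).mp hy)
    simpa using hys
  rw [hnil, List.append_nil]

-- A's break-scan over rarityItems is a modify at the category catF names (known traits)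
theorem step_eq (t : String) (ht : t ∈ traitNames) (rc : PySem.Dict String Int) :
    aRarityScan rarityItems rc t = rc.modify (catF t) 0 (· + 1) := by
  simp [traitNames] at ht
  rcases ht with rfl|rfl|rfl|rfl|rfl|rfl|rfl|rfl|rfl|rfl|rfl|rfl|rfl|rfl|rfl|rfl|rfl|rfl|rfl <;> rfl

theorem mem_cat : ∀ t ∈ traitNames, catF t ∈ catNames := by decide

-- the 0/1 bridge: a category list contains a known trait exactly when catF sends it there
theorem bridge : ∀ t ∈ traitNames, ∀ p ∈ rarityItems,
    (p.2.map (fun u => if u = t then (1 : Int) else 0)).sum = if catF t = p.1 then 1 else 0 := by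
  decide

-- counting through the map catF equals summing per-trait counts over the category's list
theorem count_map_catF (rolled : List String) (h : ∀ t ∈ rolled, t ∈ traitNames)
    (p : String × List String) (hp : p ∈ rarityItems) :
    (((rolled.map catF).count p.1 : Int)) = (p.2.map (fun t => ((rolled.count t : Int)))).sum := by
  induction rolled with
  | nil => simp
  | cons t rest ih =>
      have htm : t ∈ traitNames := h t (by simp)
      have ih' := ih (fun u hu => h u (by simp [hu]))
      simp only [List.map_cons, List.count_cons]
      push_cast
      rw [ih']
      rw [PySem.List.sum_map_add_int p.2 (fun u => (List.count u rest : Int))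
            (fun u => if (t == u) = true then (1 : Int) else 0)]
      congr 1
      have hm : (p.2.map (fun u => if (t == u) = true then (1 : Int) else 0))
          = p.2.map (fun u => if u = t then (1 : Int) else 0) := by
        apply List.map_congr_left
        intro u _
        by_cases hu : u = t
        · subst hu; simp
        · have hb : (t == u) = false := beq_eq_false_iff_ne.mpr (Ne.symm hu)
          simp [hb, hu]
      rw [hm, bridge t htm p hp]
      simp [beq_iff_eq]

theorem countsA_items (rolled : List String) (h : ∀ t ∈ rolled, t ∈ traitNames) :
    (rolled.foldl (fun d t => d.modify t 0 (· + 1))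
        (traitNames.foldl (fun d t => d.insert t 0) PySem.Dict.empty)).items
      = traitNames.map (fun t => (t, (rolled.count t : Int))) := by
  set initC : PySem.Dict String Int := traitNames.foldl (fun d t => d.insert t 0) PySem.Dict.empty with hinit
  have hkeys : (rolled.foldl (fun d t => d.modify t 0 (· + 1)) initC).keys = traitNames := by
    rw [PySem.Dict.keys_foldl_modify rolled 0 (fun _ _ => (· + 1)) initC]
    have : initC.keys = traitNames := by decide
    rw [this, set_update_of_subset _ _ h]
  have hnd : (rolled.foldl (fun d t => d.modify t 0 (· + 1)) initC).keys.Nodup := by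
    rw [hkeys]; decide
  rw [PySem.Dict.items_eq_map_keys _ hnd 0, hkeys]
  apply List.map_congr_left
  intro t htm
  rw [PySem.Dict.getD_foldl_modify_add_one rolled initC t]
  have h0 : initC.getD t 0 = 0 := by
    revert htm; revert t; decide
  rw [h0, zero_add]

theorem rarityA_items (rolled : List String) (h : ∀ t ∈ rolled, t ∈ traitNames) :
    (rolled.foldl (fun d t => aRarityScan rarityItems d t)
        (rarityItems.foldl (fun d p => d.insert p.1 0) PySem.Dict.empty)).items
      = rarityItems.map (fun p => (p.1, (((rolled.map catF).count p.1 : Int)))) := by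
  set initR : PySem.Dict String Int := rarityItems.foldl (fun d p => d.insert p.1 0) PySem.Dict.empty with hinit
  have hfold : rolled.foldl (fun d t => aRarityScan rarityItems d t) initR
      = (rolled.map catF).foldl (fun d c => d.modify c 0 (· + 1)) initR := by
    rw [List.foldl_map]
    exact PySem.List.foldl_congr_mem rolled _ _ initR (fun acc x hx => step_eq x (h x hx) acc)
  rw [hfold]
  have hkeys : ((rolled.map catF).foldl (fun d c => d.modify c 0 (· + 1)) initR).keys = catNames := by
    rw [PySem.Dict.keys_foldl_modify (rolled.map catF) 0 (fun _ _ => (· + 1)) initR]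
    have h1 : initR.keys = catNames := by decide
    rw [h1, set_update_of_subset]
    intro x hx
    obtain ⟨t, ht, rfl⟩ := List.mem_map.mp hx
    exact mem_cat t (h t ht)
  have hnd : ((rolled.map catF).foldl (fun d c => d.modify c 0 (· + 1)) initR).keys.Nodup := by
    rw [hkeys]; decide
  rw [PySem.Dict.items_eq_map_keys _ hnd 0, hkeys]
  have hc : catNames = rarityItems.map (·.1) := rfl
  rw [hc, List.map_map]
  apply List.map_congr_left
  intro p hp
  simp only [Function.comp]
  rw [PySem.Dict.getD_foldl_modify_add_one (rolled.map catF) initR p.1]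
  have h0 : initR.getD p.1 0 = 0 := by
    have hall : ∀ c ∈ catNames, initR.getD c 0 = 0 := by decide
    exact hall p.1 (List.mem_map_of_mem hp)
  rw [h0, zero_add]

-- merging a pair list by 'modify key (· + value)' adds, per key, the sum of its values
theorem merge_getD (l : List (String × Int)) (d : PySem.Dict String Int) (k : String) :
    (l.foldl (fun d p => d.modify p.1 0 (· + p.2)) d).getD k 0
      = d.getD k 0 + ((l.filter (fun p => p.1 == k)).map (·.2)).sum := by
  induction l generalizing d with
  | nil => simp
  | cons p rest ih =>
      simp only [List.foldl_cons, ih, List.filter_cons]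
      by_cases hk : p.1 = k
      · simp [hk]
        ring
      · have hb : (p.1 == k) = false := beq_eq_false_iff_ne.mpr hk
        have hk' : ¬ k = p.1 := fun h' => hk h'.symm
        simp [hb, PySem.Dict.getD_modify, hk']

theorem countsB_items (rolled : List String) (h : ∀ t ∈ rolled, t ∈ traitNames) :
    ((PySem.Dict.counter rolled).items.foldl (fun d p => d.modify p.1 0 (· + p.2))
        (traitNames.foldl (fun d t => d.insert t 0) PySem.Dict.empty)).items
      = traitNames.map (fun t => (t, (rolled.count t : Int))) := by
  set initC : PySem.Dict String Int := traitNames.foldl (fun d t => d.insert t 0) PySem.Dict.empty with hinit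
  set l := (PySem.Dict.counter rolled).items with hl
  have hkeys : (l.foldl (fun d p => d.modify p.1 0 (· + p.2)) initC).keys = traitNames := by
    rw [PySem.Dict.keys_foldl_modify_key l Prod.fst 0 (fun _ p => (· + p.2)) initC]
    have h1 : initC.keys = traitNames := by decide
    have h2 : l.map Prod.fst = PySem.Set.ofList rolled := by
      rw [hl]
      exact PySem.Dict.keys_counter rolled
    rw [h1, h2, set_update_of_subset]
    intro x hx
    exact h x ((PySem.Set.mem_ofList (xs := rolled) (y := x)).mp hx)
  have hnd : (l.foldl (fun d p => d.modify p.1 0 (· + p.2)) initC).keys.Nodup := by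
    rw [hkeys]; decide
  rw [PySem.Dict.items_eq_map_keys _ hnd 0, hkeys]
  apply List.map_congr_left
  intro t htm
  rw [merge_getD l initC t]
  have h0 : initC.getD t 0 = 0 := by
    revert htm; revert t; decide
  rw [h0, zero_add, hl, PySem.Dict.items_counter rolled]
  rw [List.filter_map]
  have hfil : (PySem.Set.ofList rolled).filter ((fun p => p.1 == t) ∘ (fun k => (k, (rolled.count k : Int))))
      = (PySem.Set.ofList rolled).filter (· == t) := by
    apply List.filter_congr
    intro x _
    rfl
  rw [hfil, List.filter_beq]
  by_cases hmem : t ∈ rolled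
  · have h1 : (PySem.Set.ofList rolled).count t = 1 :=
      List.count_eq_one_of_mem (PySem.Set.nodup_ofList rolled) ((PySem.Set.mem_ofList (xs := rolled) (y := t)).mpr hmem)
    simp [h1]
  · have h1 : (PySem.Set.ofList rolled).count t = 0 :=
      List.count_eq_zero_of_not_mem (fun hc => hmem ((PySem.Set.mem_ofList (xs := rolled) (y := t)).mp hc))
    have h2 : rolled.count t = 0 := List.count_eq_zero_of_not_mem hmem
    simp [h1, h2]

theorem rarityB_items (rolled : List String) :
    (rarityItems.foldl (fun d p => d.insert p.1 (p.2.foldl (fun s t => s + (PySem.Dict.counter rolled).getD t 0) 0)) PySem.Dict.empty).items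
      = rarityItems.map (fun p => (p.1, (p.2.map (fun t => ((rolled.count t : Int)))).sum)) := by
  rw [PySem.Dict.items_foldl_insert_fresh rarityItems (fun p => p.1)
      (fun p => p.2.foldl (fun s t => s + (PySem.Dict.counter rolled).getD t 0) 0) PySem.Dict.empty
      (by intro a _; exact PySem.Dict.contains_empty _) (by decide)]
  simp only [PySem.Dict.empty, List.nil_append]
  apply List.map_congr_left
  intro p _
  rw [PySem.List.foldl_add p.2 (fun t => (PySem.Dict.counter rolled).getD t 0) 0]
  simp [PySem.Dict.getD_counter]

-- ===== VERDICT (by name: the statement is the Claim_ definition above) =====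
theorem categorize_traits_spec : Claim_equal_categorize_traits := by
  intro rolled _ hpre
  unfold Spec_categorize_traits
  have h : ∀ t ∈ rolled, t ∈ traitNames := by
    intro t ht
    have := List.all_eq_true.mp hpre t ht
    simpa using this
  unfold categorize_traits categorize_traits_alt
  simp only []
  rw [PySem.Dict.foldl_insert_getD_add_one_eq_counter rolled]
  rw [PySem.List.foldl_prod_mk (fun (d : PySem.Dict String Int) (t : String) => d.modify t 0 (· + 1))
      (fun (d : PySem.Dict String Int) (t : String) => aRarityScan rarityItems d t) rolled
      (traitNames.foldl (fun d t => d.insert t 0) PySem.Dict.empty)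
      (rarityItems.foldl (fun d p => d.insert p.1 0) PySem.Dict.empty)]
  rw [countsB_items rolled h, rarityB_items rolled, countsA_items rolled h, rarityA_items rolled h]
  refine Prod.ext rfl ?_
  simp only []
  apply List.map_congr_left
  intro p hp
  rw [count_map_catF rolled h p hp]
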